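-- pv_equiv track=rewrite | github.com/lhiginbotham/AdventOfCode2015 | p11/1.py | password_matches_rules
-- ===== SOURCE A (Python) =====
-- def password_matches_rules(password):
--     for c in 'iol':
--         if c in password:
--             return False
--
--     containsSequence = False
--     for i in range(len(password) - 2):
--         one = password[i]
--         two = password[i + 1]
--         three = password[i + 2]
--         if one == chr(ord(two) - 1) and two == chr(ord(three) - 1):
--             containsSequence = True
--
--     numDoubledPairs = 0
--     i = 0
--     while i < len(password) - 1:
--         if password[i] == password[i + 1]:
--             numDoubledPairs += 1
--             i += 1
--         i += 1
--
--     return containsSequence and numDoubledPairs >= 2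
-- ===== SOURCE B (Python) =====
-- def password_matches_rules(password):
--     if set(password) & set('iol'):
--         return False
--     # run-length encode the password; non-overlapping doubled pairs = sum of len//2 per run
--     runs = []
--     for ch in password:
--         if runs and runs[-1][0] == ch:
--             runs[-1][1] += 1
--         else:
--             runs.append([ch, 1])
--     pairs = sum(n // 2 for _, n in runs)
--     has_seq = any(ord(a) + 1 == ord(b) and ord(b) + 1 == ord(c)
--                   for a, b, c in zip(password, password[1:], password[2:]))
--     return has_seq and pairs >= 2
-- ===== Notes on version B (the rewrite author's own statement) =====
-- stated objective: alternative
-- what changed: B counts doubled pairs by run-length-encoding the password and summing len//2 over maximal runs (an arithmetic characterization replacing A's index-skipping while loop), detects the straight with an any() over zip of three shifted views, and checks forbidden letters via set intersection instead of three substring scans.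
import Mathlib
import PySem

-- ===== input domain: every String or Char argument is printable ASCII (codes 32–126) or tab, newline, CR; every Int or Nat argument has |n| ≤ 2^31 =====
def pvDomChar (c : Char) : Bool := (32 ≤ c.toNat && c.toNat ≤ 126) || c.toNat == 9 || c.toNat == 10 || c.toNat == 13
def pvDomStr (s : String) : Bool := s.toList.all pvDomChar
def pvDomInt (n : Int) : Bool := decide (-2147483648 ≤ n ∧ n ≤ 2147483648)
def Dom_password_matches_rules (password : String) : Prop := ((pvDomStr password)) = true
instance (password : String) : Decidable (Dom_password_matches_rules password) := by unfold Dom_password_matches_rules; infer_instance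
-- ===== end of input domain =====

-- B counts pairs via run-length encoding (sum of len//2 over maximal runs) instead of A's
-- index-skipping scan, uses zip of shifted views for the straight, and a set intersection
-- for forbidden letters (objective: alternative algorithm, same O(n) cost).

-- ===== PORT A =====
-- A's while-loop for non-overlapping doubled pairs: on a counted pair the index advances by 2.
-- Indexing is via getD; every index used is in bounds so the default is never read.
def aPairs (cs : List Char) (i : Nat) : Nat :=
  if i + 1 < cs.length then
    if cs.getD i ' ' = cs.getD (i + 1) ' ' then 1 + aPairs cs (i + 2)
    else aPairs cs (i + 1)
  else 0
termination_by cs.length - i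
decreasing_by all_goals omega

-- port of A; 'one == chr(ord(two)-1)' is ported as the Int comparison ord one = ord two - 1,
-- exact for the NUL-free strings of Dom (chr is injective on valid codes).
def password_matches_rules (password : String) : Bool :=
  let cs := password.toList
  if "iol".toList.any (fun c => cs.contains c) then false
  else
    let containsSequence :=
      (List.range (cs.length - 2)).foldl
        (fun acc i =>
          if ((cs.getD i ' ').toNat : Int) = ((cs.getD (i + 1) ' ').toNat : Int) - 1 ∧
             ((cs.getD (i + 1) ' ').toNat : Int) = ((cs.getD (i + 2) ' ').toNat : Int) - 1
          then true else acc)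
        false
    containsSequence && decide (aPairs cs 0 ≥ 2)

-- ===== PORT B =====
-- Source B's RLE loop: Python mutates runs[-1], so the port keeps the run list newest-first
-- (the later sum over runs does not depend on the order).
def bStep (runs : List (Char × Nat)) (ch : Char) : List (Char × Nat) :=
  match runs with
  | (d, n) :: t => if d = ch then (d, n + 1) :: t else (ch, 1) :: (d, n) :: t
  | [] => [(ch, 1)]

def password_matches_rules_alt (password : String) : Bool :=
  let cs := password.toList
  if (PySem.Set.inter (PySem.Set.ofList cs) (PySem.Set.ofList "iol".toList)).isEmpty then
    let runs := cs.foldl bStep []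
    let pairs : Nat := runs.foldl (fun s p => s + p.2 / 2) 0
    let hasSeq := ((cs.zip (cs.drop 1)).zip (cs.drop 2)).any (fun t =>
      decide (((t.1.1.toNat : Int) + 1 = (t.1.2.toNat : Int)) ∧
              ((t.1.2.toNat : Int) + 1 = (t.2.toNat : Int))))
    hasSeq && decide (pairs ≥ 2)
  else false

-- ===== PRECONDITION & SPEC =====
def Spec_password_matches_rules (password : String) (out : Bool) : Prop := out = password_matches_rules_alt password
instance (password : String) (out : Bool) : Decidable (Spec_password_matches_rules password out) := by unfold Spec_password_matches_rules; infer_instance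

-- ===== CLAIM =====
def Claim_equal_password_matches_rules : Prop := ∀ (password : String), Dom_password_matches_rules password → Spec_password_matches_rules password (password_matches_rules password)

-- ===== LEMMAS AND PROOFS =====

-- non-overlapping pair count as structural recursion on the list (bridge between both ports)
def cnt : List Char → Nat
  | [] => 0
  | [_] => 0
  | a :: b :: rest => if a = b then 1 + cnt rest else cnt (b :: rest)

-- A's index-based skipping scan computes cnt of the dropped suffix
lemma aPairs_eq_cnt (cs : List Char) : ∀ m i, cs.length - i ≤ m → aPairs cs i = cnt (cs.drop i) := by
  intro m
  induction m with
  | zero =>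
    intro i h
    rw [aPairs, if_neg (by omega)]
    rw [List.drop_eq_nil_of_le (by omega : cs.length ≤ i)]
    rfl
  | succ m ih =>
    intro i h
    by_cases h1 : i + 1 < cs.length
    · have hi : i < cs.length := by omega
      have hd : List.drop i cs = cs[i] :: cs[i+1] :: List.drop (i+2) cs := by
        rw [List.drop_eq_getElem_cons hi, List.drop_eq_getElem_cons h1]
      rw [aPairs, if_pos h1, hd, cnt,
        List.getD_eq_getElem cs ' ' hi, List.getD_eq_getElem cs ' ' h1]
      by_cases hp : cs[i] = cs[i+1]
      · rw [if_pos hp, if_pos hp, ih (i + 2) (by omega)]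
      · rw [if_neg hp, if_neg hp, ih (i + 1) (by omega),
          List.drop_eq_getElem_cons h1]
    · rw [aPairs, if_neg h1]
      rcases Nat.lt_or_ge i cs.length with hi | hi
      · have hd : List.drop i cs = [cs[i]] := by
          rw [List.drop_eq_getElem_cons hi, List.drop_eq_nil_of_le (by omega)]
        rw [hd]; rfl
      · rw [List.drop_eq_nil_of_le hi]; rfl

-- the contribution of an open run (char d, length n so far) followed by rest
def runCnt : Char → Nat → List Char → Nat
  | _, n, [] => n / 2
  | d, n, c :: rest => if c = d then runCnt d (n + 1) rest else n / 2 + runCnt c 1 rest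

def sumH (runs : List (Char × Nat)) : Nat := (runs.map (fun p => p.2 / 2)).sum

lemma foldl_sumH (l : List (Char × Nat)) : ∀ a, l.foldl (fun s p => s + p.2 / 2) a = a + sumH l := by
  induction l with
  | nil => intro a; simp [sumH]
  | cons x xs ih => intro a; simp only [List.foldl_cons, ih, sumH, List.map_cons, List.sum_cons]; omega

lemma foldl_bStep (rest : List Char) : ∀ d n t,
    sumH (rest.foldl bStep ((d, n) :: t)) = sumH t + runCnt d n rest := by
  induction rest with
  | nil => intro d n t; simp [runCnt, sumH]; omega
  | cons c r ih =>
    intro d n t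
    simp only [List.foldl_cons, bStep, runCnt]
    by_cases hc : d = c
    · rw [if_pos hc, if_pos hc.symm, ih]
    · rw [if_neg hc, if_neg (fun h => hc h.symm), ih]
      simp [sumH]; omega

-- cnt over a block of n copies of d followed by rest not starting with d
lemma cnt_replicate_append (d : Char) (rest : List Char) (hr : rest.head? ≠ some d) :
    ∀ n, cnt (List.replicate n d ++ rest) = n / 2 + cnt rest := by
  intro n
  induction n using Nat.strong_induction_on with
  | _ n ih =>
    match n with
    | 0 => simp
    | 1 =>
      cases rest with
      | nil => simp [cnt]
      | cons c r =>
        simp only [List.replicate_one, List.singleton_append, cnt]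
        rw [if_neg (by simp only [List.head?_cons, ne_eq, Option.some.injEq] at hr
                       exact fun h => hr h.symm)]
        omega
    | (m + 2) =>
      have hsplit : List.replicate (m + 2) d ++ rest = d :: d :: (List.replicate m d ++ rest) := by
        simp [List.replicate_succ]
      rw [hsplit, cnt, if_pos rfl, ih m (by omega)]
      omega

lemma cnt_eq_runCnt (rest : List Char) : ∀ d n, cnt (List.replicate n d ++ rest) = runCnt d n rest := by
  induction rest with
  | nil =>
    intro d n
    rw [runCnt, cnt_replicate_append d [] (by simp) n]
    rfl
  | cons c r ih =>
    intro d n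
    rw [runCnt]
    by_cases hc : c = d
    · rw [if_pos hc, ← ih d (n + 1), hc, List.replicate_succ']
      simp
    · rw [if_neg hc, cnt_replicate_append d (c :: r) (by simpa using hc) n, ← ih c 1]
      simp

-- B's pair count equals cnt
lemma pairs_eq_cnt (cs : List Char) : sumH (cs.foldl bStep []) = cnt cs := by
  cases cs with
  | nil => simp [sumH, cnt]
  | cons c r =>
    have h0 : bStep [] c = [(c, 1)] := rfl
    rw [List.foldl_cons, h0, foldl_bStep r c 1 [], ← cnt_eq_runCnt r c 1]
    simp [sumH]

-- a fold that ors a boolean per element equals any (A's seq loop shape)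
lemma foldl_ite_or (cs : List Char) (l : List Nat) (b : Bool) :
    l.foldl (fun acc i =>
      if ((cs.getD i ' ').toNat : Int) = ((cs.getD (i + 1) ' ').toNat : Int) - 1 ∧
         ((cs.getD (i + 1) ' ').toNat : Int) = ((cs.getD (i + 2) ' ').toNat : Int) - 1
      then true else acc) b =
    (b || l.any (fun i =>
      decide (((cs.getD i ' ').toNat : Int) = ((cs.getD (i + 1) ' ').toNat : Int) - 1 ∧
              ((cs.getD (i + 1) ' ').toNat : Int) = ((cs.getD (i + 2) ' ').toNat : Int) - 1))) := by
  induction l generalizing b with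
  | nil => simp
  | cons x xs ih =>
    simp only [List.foldl_cons, List.any_cons, ih]
    by_cases hx : ((cs.getD x ' ').toNat : Int) = ((cs.getD (x + 1) ' ').toNat : Int) - 1 ∧
        ((cs.getD (x + 1) ' ').toNat : Int) = ((cs.getD (x + 2) ' ').toNat : Int) - 1
    · cases b <;> simp
    · cases b <;> simp

-- A's index-loop straight detection = B's zip-of-shifted-views detection
lemma seq_eq (cs : List Char) :
    (List.range (cs.length - 2)).any (fun i =>
      decide (((cs.getD i ' ').toNat : Int) = ((cs.getD (i + 1) ' ').toNat : Int) - 1 ∧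
              ((cs.getD (i + 1) ' ').toNat : Int) = ((cs.getD (i + 2) ' ').toNat : Int) - 1)) =
    ((cs.zip (cs.drop 1)).zip (cs.drop 2)).any (fun t =>
      decide (((t.1.1.toNat : Int) + 1 = (t.1.2.toNat : Int)) ∧
              ((t.1.2.toNat : Int) + 1 = (t.2.toNat : Int)))) := by
  have hlen : ((cs.zip (cs.drop 1)).zip (cs.drop 2)).length = cs.length - 2 := by
    simp [List.length_zip]; omega
  rw [Bool.eq_iff_iff]
  constructor
  · intro h
    simp only [List.any_eq_true, List.mem_range, decide_eq_true_eq] at h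
    obtain ⟨i, hi, h1, h2⟩ := h
    rw [List.getD_eq_getElem cs ' ' (by omega : i < cs.length),
      List.getD_eq_getElem cs ' ' (by omega : i + 1 < cs.length)] at h1
    rw [List.getD_eq_getElem cs ' ' (by omega : i + 1 < cs.length),
      List.getD_eq_getElem cs ' ' (by omega : i + 2 < cs.length)] at h2
    simp only [List.any_eq_true, decide_eq_true_eq]
    refine ⟨((cs.zip (cs.drop 1)).zip (cs.drop 2))[i]'(by rw [hlen]; exact hi),
      List.getElem_mem _, ?_⟩
    simp only [List.getElem_zip, List.getElem_drop,
      show 1 + i = i + 1 from by omega, show 2 + i = i + 2 from by omega]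
    exact ⟨by omega, by omega⟩
  · intro h
    simp only [List.any_eq_true, decide_eq_true_eq] at h
    obtain ⟨t, ht, hP⟩ := h
    rw [List.mem_iff_getElem] at ht
    obtain ⟨i, hilen, rfl⟩ := ht
    simp only [List.getElem_zip, List.getElem_drop,
      show ∀ j : Nat, 1 + j = j + 1 from fun j => by omega,
      show ∀ j : Nat, 2 + j = j + 2 from fun j => by omega] at hP
    have hi : i < cs.length - 2 := by rw [hlen] at hilen; exact hilen
    simp only [List.any_eq_true, List.mem_range, decide_eq_true_eq]
    refine ⟨i, hi, ?_, ?_⟩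
    · rw [List.getD_eq_getElem cs ' ' (by omega : i < cs.length),
        List.getD_eq_getElem cs ' ' (by omega : i + 1 < cs.length)]
      omega
    · rw [List.getD_eq_getElem cs ' ' (by omega : i + 1 < cs.length),
        List.getD_eq_getElem cs ' ' (by omega : i + 2 < cs.length)]
      omega

-- A's three membership scans = B's set-intersection emptiness test
lemma forbidden_eq (cs : List Char) :
    ("iol".toList.any (fun c => cs.contains c)) =
    !(PySem.Set.inter (PySem.Set.ofList cs) (PySem.Set.ofList "iol".toList)).isEmpty := by
  rw [Bool.eq_iff_iff]
  simp only [List.any_eq_true, List.contains_iff_mem, Bool.not_eq_true',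
    List.isEmpty_eq_false_iff_exists_mem]
  constructor
  · rintro ⟨c, h1, h2⟩
    exact ⟨c, (PySem.Set.mem_inter _ _ _).mpr
      ⟨(PySem.Set.mem_ofList _ _).mpr h2, (PySem.Set.mem_ofList _ _).mpr h1⟩⟩
  · rintro ⟨c, hc⟩
    obtain ⟨h2, h1⟩ := (PySem.Set.mem_inter _ _ _).mp hc
    exact ⟨c, (PySem.Set.mem_ofList _ _).mp h1, (PySem.Set.mem_ofList _ _).mp h2⟩

lemma ports_eq (cs : List Char) :
    (if "iol".toList.any (fun c => cs.contains c) then false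
     else
       ((List.range (cs.length - 2)).foldl
         (fun acc i =>
           if ((cs.getD i ' ').toNat : Int) = ((cs.getD (i + 1) ' ').toNat : Int) - 1 ∧
              ((cs.getD (i + 1) ' ').toNat : Int) = ((cs.getD (i + 2) ' ').toNat : Int) - 1
           then true else acc)
         false) && decide (aPairs cs 0 ≥ 2)) =
    (if (PySem.Set.inter (PySem.Set.ofList cs) (PySem.Set.ofList "iol".toList)).isEmpty then
      (((cs.zip (cs.drop 1)).zip (cs.drop 2)).any (fun t =>
        decide (((t.1.1.toNat : Int) + 1 = (t.1.2.toNat : Int)) ∧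
                ((t.1.2.toNat : Int) + 1 = (t.2.toNat : Int)))) &&
        decide (((cs.foldl bStep []).foldl (fun s p => s + p.2 / 2) 0) ≥ 2))
    else false) := by
  rw [foldl_ite_or, Bool.false_or, seq_eq,
    aPairs_eq_cnt cs cs.length 0 (by omega), List.drop_zero,
    show ((cs.foldl bStep []).foldl (fun s p => s + p.2 / 2) 0) = sumH (cs.foldl bStep []) from by
      rw [foldl_sumH, Nat.zero_add],
    pairs_eq_cnt, forbidden_eq]
  cases (PySem.Set.inter (PySem.Set.ofList cs) (PySem.Set.ofList "iol".toList)).isEmpty <;> simp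

-- ===== VERDICT =====
theorem password_matches_rules_spec : Claim_equal_password_matches_rules := by
  intro password _
  unfold Spec_password_matches_rules
  exact ports_eq password.toList
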